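-- pv_equiv track=rewrite | github.com/parzidev/esatinproje | scraper xd/kart_degerlerini_ekle_v2.py | isime_gore_deger_ata
-- ===== SOURCE A (Python) =====
-- def isime_gore_deger_ata(kart):
--     """Kart ismine göre özel değerler atar"""
--     isim = kart.get("isim", "").lower()
--
--     # Büyük birimler
--     if any(x in isim for x in ["giant", "colossus", "titan", "dragon", "leviathan", "behemoth"]):
--         kart["energy"] = "3"
--         kart["power"] = "3"
--         kart["might"] = "4"
--
--     # Küçük birimler
--     elif any(x in isim for x in ["poro", "sprite", "fae", "yordle", "minion", "follower"]):
--         kart["energy"] = "0"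
--         kart["power"] = "1"
--         kart["might"] = "1"
--
--     # Orta büyüklükte birimler
--     elif any(x in isim for x in ["warrior", "soldier", "knight", "guard", "sentinel"]):
--         kart["energy"] = "1"
--         kart["power"] = "2"
--         kart["might"] = "2"
--
--     # Güçlü büyüler
--     elif any(x in isim for x in ["ultimate", "cataclysm", "judgment", "vengeance", "ruination"]):
--         kart["energy"] = "3"
--         kart["power"] = "0"
--         kart["might"] = "3"
--
--     # Zayıf büyüler
--     elif any(x in isim for x in ["minor", "small", "little", "flash", "spark"]):
--         kart["energy"] = "0"
--         kart["power"] = "0"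
--         kart["might"] = "1"
--
--     return kart
-- ===== SOURCE B (Python) =====
-- # Flat keyword->(priority, stats) index; collect all matching keywords in one
-- # pass and apply the stats of the best (lowest-priority) hit, instead of A's
-- # staged elif chain with per-group any() and early exit.
-- KEYWORD_STATS = {
--     "giant": (0, ("3", "3", "4")),
--     "colossus": (0, ("3", "3", "4")),
--     "titan": (0, ("3", "3", "4")),
--     "dragon": (0, ("3", "3", "4")),
--     "leviathan": (0, ("3", "3", "4")),
--     "behemoth": (0, ("3", "3", "4")),
--     "poro": (1, ("0", "1", "1")),
--     "sprite": (1, ("0", "1", "1")),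
--     "fae": (1, ("0", "1", "1")),
--     "yordle": (1, ("0", "1", "1")),
--     "minion": (1, ("0", "1", "1")),
--     "follower": (1, ("0", "1", "1")),
--     "warrior": (2, ("1", "2", "2")),
--     "soldier": (2, ("1", "2", "2")),
--     "knight": (2, ("1", "2", "2")),
--     "guard": (2, ("1", "2", "2")),
--     "sentinel": (2, ("1", "2", "2")),
--     "ultimate": (3, ("3", "0", "3")),
--     "cataclysm": (3, ("3", "0", "3")),
--     "judgment": (3, ("3", "0", "3")),
--     "vengeance": (3, ("3", "0", "3")),
--     "ruination": (3, ("3", "0", "3")),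
--     "minor": (4, ("0", "0", "1")),
--     "small": (4, ("0", "0", "1")),
--     "little": (4, ("0", "0", "1")),
--     "flash": (4, ("0", "0", "1")),
--     "spark": (4, ("0", "0", "1")),
-- }
--
--
-- def isime_gore_deger_ata(kart):
--     """Kart ismine gore ozel degerler atar (flat keyword index + best hit)."""
--     isim = kart.get("isim", "").lower()
--     hits = [v for kw, v in KEYWORD_STATS.items() if kw in isim]
--     if hits:
--         kart["energy"], kart["power"], kart["might"] = min(hits, key=lambda h: h[0])[1]
--     return kart
-- ===== Notes on version B (the rewrite author's own statement) =====
-- stated objective: alternative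
-- what changed: Replaced the five-branch if/elif chain of per-group any() tests by a flat keyword->(priority,stats) index scanned once to collect all matching keywords, then a min-by-priority selection of the stats to apply (no assignment when no keyword matches).
import Mathlib
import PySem

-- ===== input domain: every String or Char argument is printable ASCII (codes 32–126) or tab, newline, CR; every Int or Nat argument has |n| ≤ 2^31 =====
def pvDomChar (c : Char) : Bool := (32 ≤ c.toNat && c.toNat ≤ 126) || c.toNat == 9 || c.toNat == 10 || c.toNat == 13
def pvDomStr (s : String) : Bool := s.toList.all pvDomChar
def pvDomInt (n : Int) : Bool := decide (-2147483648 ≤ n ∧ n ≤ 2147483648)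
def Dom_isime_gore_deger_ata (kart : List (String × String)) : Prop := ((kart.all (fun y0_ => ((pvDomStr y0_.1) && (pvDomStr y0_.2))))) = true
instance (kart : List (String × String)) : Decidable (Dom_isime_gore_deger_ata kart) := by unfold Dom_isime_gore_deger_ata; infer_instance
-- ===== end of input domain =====

-- B replaces A's five-branch if/elif chain by a flat keyword -> (priority, stats)
-- index scanned once for all matching keywords, followed by a min-by-priority
-- selection (objective: alternative). Both Pythons mutate the card dict in place;
-- the equivalence proved here is about the returned value.

-- ===== PORT A =====
-- A: chain of if/elif branches, each testing its own literal keyword list and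
-- assigning its three literal stat strings.
def isime_gore_deger_ata (kart : List (String × String)) : List (String × String) :=
  let d : PySem.Dict String String := PySem.Dict.ofList kart
  let isim := PySem.Str.lower (d.getD "isim" "")
  if ["giant", "colossus", "titan", "dragon", "leviathan", "behemoth"].any
      (fun x => PySem.Str.isIn x isim) then
    ((((d.insert "energy" "3").insert "power" "3").insert "might" "4")).items
  else if ["poro", "sprite", "fae", "yordle", "minion", "follower"].any
      (fun x => PySem.Str.isIn x isim) then
    ((((d.insert "energy" "0").insert "power" "1").insert "might" "1")).items
  else if ["warrior", "soldier", "knight", "guard", "sentinel"].any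
      (fun x => PySem.Str.isIn x isim) then
    ((((d.insert "energy" "1").insert "power" "2").insert "might" "2")).items
  else if ["ultimate", "cataclysm", "judgment", "vengeance", "ruination"].any
      (fun x => PySem.Str.isIn x isim) then
    ((((d.insert "energy" "3").insert "power" "0").insert "might" "3")).items
  else if ["minor", "small", "little", "flash", "spark"].any
      (fun x => PySem.Str.isIn x isim) then
    ((((d.insert "energy" "0").insert "power" "0").insert "might" "1")).items
  else
    d.items

-- ===== PORT B =====
-- B: flat keyword -> (priority, (energy, power, might)) index (the Python dict
-- literal KEYWORD_STATS, in insertion order).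
def pvKeywordStats : List (String × Nat × (String × String × String)) :=
  [ ("giant", 0, ("3", "3", "4")), ("colossus", 0, ("3", "3", "4")),
    ("titan", 0, ("3", "3", "4")), ("dragon", 0, ("3", "3", "4")),
    ("leviathan", 0, ("3", "3", "4")), ("behemoth", 0, ("3", "3", "4")),
    ("poro", 1, ("0", "1", "1")), ("sprite", 1, ("0", "1", "1")),
    ("fae", 1, ("0", "1", "1")), ("yordle", 1, ("0", "1", "1")),
    ("minion", 1, ("0", "1", "1")), ("follower", 1, ("0", "1", "1")),
    ("warrior", 2, ("1", "2", "2")), ("soldier", 2, ("1", "2", "2")),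
    ("knight", 2, ("1", "2", "2")), ("guard", 2, ("1", "2", "2")),
    ("sentinel", 2, ("1", "2", "2")),
    ("ultimate", 3, ("3", "0", "3")), ("cataclysm", 3, ("3", "0", "3")),
    ("judgment", 3, ("3", "0", "3")), ("vengeance", 3, ("3", "0", "3")),
    ("ruination", 3, ("3", "0", "3")),
    ("minor", 4, ("0", "0", "1")), ("small", 4, ("0", "0", "1")),
    ("little", 4, ("0", "0", "1")), ("flash", 4, ("0", "0", "1")),
    ("spark", 4, ("0", "0", "1")) ]

-- B: collect the values of all matching keywords, then min(hits, key=priority).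
def isime_gore_deger_ata_alt (kart : List (String × String)) : List (String × String) :=
  let d : PySem.Dict String String := PySem.Dict.ofList kart
  let isim := PySem.Str.lower (d.getD "isim" "")
  let hits := (pvKeywordStats.filter (fun e => PySem.Str.isIn e.1 isim)).map (fun e => e.2)
  match PySem.List.min? hits (fun h => h.1) with
  | some (_, (e, p, m)) =>
      ((((d.insert "energy" e).insert "power" p).insert "might" m)).items
  | none => d.items

-- ===== PRECONDITION & SPEC =====
def Spec_isime_gore_deger_ata (kart : List (String × String)) (out : List (String × String)) : Prop := out = isime_gore_deger_ata_alt kart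
instance (kart : List (String × String)) (out : List (String × String)) : Decidable (Spec_isime_gore_deger_ata kart out) := by unfold Spec_isime_gore_deger_ata; infer_instance

-- ===== CLAIM =====
def Claim_equal_isime_gore_deger_ata : Prop := ∀ (kart : List (String × String)), Dom_isime_gore_deger_ata kart → Spec_isime_gore_deger_ata kart (isime_gore_deger_ata kart)

-- ===== LEMMAS AND PROOFS =====

theorem pv_min_first (xs : List (Nat × (String × String × String))) (j : Nat)
    (t : String × String × String)
    (hne : (j, t) ∈ xs)
    (hge : ∀ x ∈ xs, j ≤ x.1)
    (heq : ∀ x ∈ xs, x.1 = j → x = (j, t)) :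
    PySem.List.min? xs (fun h => h.1) = some (j, t) := by
  cases h : PySem.List.min? xs (fun h => h.1) with
  | none =>
      rw [PySem.List.min?_eq_none_iff] at h
      subst h; cases hne
  | some m =>
      have hm : m ∈ xs := PySem.List.min?_mem h
      have hmin : m.1 ≤ j := PySem.List.min?_isMin h (j, t) hne
      have : m = (j, t) := heq m hm (le_antisymm hmin (hge m hm))
      rw [this]

theorem pv_split :
    pvKeywordStats =
      (["giant", "colossus", "titan", "dragon", "leviathan", "behemoth"].map (fun k => (k, (0:Nat), ("3","3","4"))))
      ++ ((["poro", "sprite", "fae", "yordle", "minion", "follower"].map (fun k => (k, (1:Nat), ("0","1","1"))))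
      ++ ((["warrior", "soldier", "knight", "guard", "sentinel"].map (fun k => (k, (2:Nat), ("1","2","2"))))
      ++ ((["ultimate", "cataclysm", "judgment", "vengeance", "ruination"].map (fun k => (k, (3:Nat), ("3","0","3"))))
      ++ (["minor", "small", "little", "flash", "spark"].map (fun k => (k, (4:Nat), ("0","0","1"))))))) := rfl

theorem pv_filter_map_group (kws : List String) (j : Nat)
    (t : String × String × String) (isim : String) :
    (((kws.map (fun k => (k, j, t))).filter
        (fun e => PySem.Str.isIn e.1 isim)).map (fun e => e.2))
    = (kws.filter (fun k => PySem.Str.isIn k isim)).map (fun _ => (j, t)) := by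
  induction kws with
  | nil => rfl
  | cons k ks ih => simp only [List.map_cons, List.filter_cons]; split <;> simp only [List.map_cons, ih]

theorem pv_hits (isim : String) :
    (pvKeywordStats.filter (fun e => PySem.Str.isIn e.1 isim)).map (fun e => e.2)
    = (["giant", "colossus", "titan", "dragon", "leviathan", "behemoth"].filter (fun k => PySem.Str.isIn k isim)).map (fun (_ : String) => ((0:Nat), ("3","3","4")))
      ++ (((["poro", "sprite", "fae", "yordle", "minion", "follower"].filter (fun k => PySem.Str.isIn k isim)).map (fun (_ : String) => ((1:Nat), ("0","1","1"))))
      ++ (((["warrior", "soldier", "knight", "guard", "sentinel"].filter (fun k => PySem.Str.isIn k isim)).map (fun (_ : String) => ((2:Nat), ("1","2","2"))))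
      ++ (((["ultimate", "cataclysm", "judgment", "vengeance", "ruination"].filter (fun k => PySem.Str.isIn k isim)).map (fun (_ : String) => ((3:Nat), ("3","0","3"))))
      ++ ((["minor", "small", "little", "flash", "spark"].filter (fun k => PySem.Str.isIn k isim)).map (fun (_ : String) => ((4:Nat), ("0","0","1"))))))) := by
  rw [pv_split]
  simp only [List.filter_append, List.map_append, pv_filter_map_group]

theorem pv_lt_append (r1 r2 : List (Nat × (String × String × String))) (j : Nat)
    (h1 : ∀ x ∈ r1, j < x.1) (h2 : ∀ x ∈ r2, j < x.1) :
    ∀ x ∈ r1 ++ r2, j < x.1 := by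
  intro x hx
  rcases List.mem_append.mp hx with h | h
  exacts [h1 x h, h2 x h]

theorem pv_lt_const (l : List String) (i j : Nat) (t : String × String × String)
    (h : j < i) : ∀ x ∈ l.map (fun _ => (i, t)), j < x.1 := by
  intro x hx
  obtain ⟨a, _, rfl⟩ := List.mem_map.mp hx
  simpa using h

theorem pv_min_group_head (l : List String) (rest : List (Nat × (String × String × String)))
    (j : Nat) (t : String × String × String)
    (hl : l ≠ [])
    (hrest : ∀ x ∈ rest, j < x.1) :
    PySem.List.min? (l.map (fun _ => (j, t)) ++ rest) (fun h => h.1) = some (j, t) := by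
  apply pv_min_first
  · obtain ⟨a, ha⟩ := List.exists_mem_of_ne_nil l hl
    exact List.mem_append_left _ (List.mem_map.mpr ⟨a, ha, rfl⟩)
  · intro x hx
    rcases List.mem_append.mp hx with h | h
    · obtain ⟨a, _, rfl⟩ := List.mem_map.mp h
      exact le_refl _
    · exact le_of_lt (hrest x h)
  · intro x hx hxj
    rcases List.mem_append.mp hx with h | h
    · obtain ⟨a, _, rfl⟩ := List.mem_map.mp h
      rfl
    · exact absurd hxj (Nat.ne_of_gt (hrest x h))

theorem pv_min_group_last (l : List String) (j : Nat) (t : String × String × String)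
    (hl : l ≠ []) :
    PySem.List.min? (l.map (fun _ => (j, t))) (fun h => h.1) = some (j, t) := by
  apply pv_min_first
  · obtain ⟨a, ha⟩ := List.exists_mem_of_ne_nil l hl
    exact List.mem_map.mpr ⟨a, ha, rfl⟩
  · intro x hx
    obtain ⟨a, _, rfl⟩ := List.mem_map.mp hx
    exact le_refl _
  · intro x hx _
    obtain ⟨a, _, rfl⟩ := List.mem_map.mp hx
    rfl

theorem pv_filter_ne_nil (l : List String) (f : String → Bool)
    (h : l.any f = true) : l.filter f ≠ [] := by
  obtain ⟨k, hk, hpk⟩ := List.any_eq_true.mp h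
  intro he
  exact List.filter_eq_nil_iff.mp he k hk hpk

theorem isime_gore_deger_ata_eq (kart : List (String × String)) :
    isime_gore_deger_ata kart = isime_gore_deger_ata_alt kart := by
  simp only [isime_gore_deger_ata, isime_gore_deger_ata_alt]
  generalize PySem.Dict.ofList kart = d
  generalize PySem.Str.lower (d.getD "isim" "") = isim
  rw [pv_hits]
  split_ifs with h1 h2 h3 h4 h5
  · rw [pv_min_group_head _ _ 0 ("3","3","4") (pv_filter_ne_nil _ _ h1)
      (pv_lt_append _ _ _ (pv_lt_const _ 1 0 _ (by omega))
        (pv_lt_append _ _ _ (pv_lt_const _ 2 0 _ (by omega))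
          (pv_lt_append _ _ _ (pv_lt_const _ 3 0 _ (by omega))
            (pv_lt_const _ 4 0 _ (by omega)))))]
  · rw [List.filter_eq_nil_iff.mpr (List.any_eq_false.mp (by rwa [Bool.not_eq_true] at h1))]
    simp only [List.map_nil, List.nil_append]
    rw [pv_min_group_head _ _ 1 ("0","1","1") (pv_filter_ne_nil _ _ h2)
      (pv_lt_append _ _ _ (pv_lt_const _ 2 1 _ (by omega))
        (pv_lt_append _ _ _ (pv_lt_const _ 3 1 _ (by omega))
          (pv_lt_const _ 4 1 _ (by omega))))]
  · rw [List.filter_eq_nil_iff.mpr (List.any_eq_false.mp (by rwa [Bool.not_eq_true] at h1)),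
      List.filter_eq_nil_iff.mpr (List.any_eq_false.mp (by rwa [Bool.not_eq_true] at h2))]
    simp only [List.map_nil, List.nil_append]
    rw [pv_min_group_head _ _ 2 ("1","2","2") (pv_filter_ne_nil _ _ h3)
      (pv_lt_append _ _ _ (pv_lt_const _ 3 2 _ (by omega))
        (pv_lt_const _ 4 2 _ (by omega)))]
  · rw [List.filter_eq_nil_iff.mpr (List.any_eq_false.mp (by rwa [Bool.not_eq_true] at h1)),
      List.filter_eq_nil_iff.mpr (List.any_eq_false.mp (by rwa [Bool.not_eq_true] at h2)),
      List.filter_eq_nil_iff.mpr (List.any_eq_false.mp (by rwa [Bool.not_eq_true] at h3))]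
    simp only [List.map_nil, List.nil_append]
    rw [pv_min_group_head _ _ 3 ("3","0","3") (pv_filter_ne_nil _ _ h4)
      (pv_lt_const _ 4 3 _ (by omega))]
  · rw [List.filter_eq_nil_iff.mpr (List.any_eq_false.mp (by rwa [Bool.not_eq_true] at h1)),
      List.filter_eq_nil_iff.mpr (List.any_eq_false.mp (by rwa [Bool.not_eq_true] at h2)),
      List.filter_eq_nil_iff.mpr (List.any_eq_false.mp (by rwa [Bool.not_eq_true] at h3)),
      List.filter_eq_nil_iff.mpr (List.any_eq_false.mp (by rwa [Bool.not_eq_true] at h4))]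
    simp only [List.map_nil, List.nil_append]
    rw [pv_min_group_last _ 4 ("0","0","1") (pv_filter_ne_nil _ _ h5)]
  · rw [List.filter_eq_nil_iff.mpr (List.any_eq_false.mp (by rwa [Bool.not_eq_true] at h1)),
      List.filter_eq_nil_iff.mpr (List.any_eq_false.mp (by rwa [Bool.not_eq_true] at h2)),
      List.filter_eq_nil_iff.mpr (List.any_eq_false.mp (by rwa [Bool.not_eq_true] at h3)),
      List.filter_eq_nil_iff.mpr (List.any_eq_false.mp (by rwa [Bool.not_eq_true] at h4)),
      List.filter_eq_nil_iff.mpr (List.any_eq_false.mp (by rwa [Bool.not_eq_true] at h5))]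
    simp only [List.map_nil, List.nil_append]
    rfl

-- ===== VERDICT =====
theorem isime_gore_deger_ata_spec : Claim_equal_isime_gore_deger_ata := by
  intro kart _
  exact isime_gore_deger_ata_eq kart
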